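-- pv_equiv track=rewrite | github.com/muhenan/Python-Algo | DateStructureAlgoOOD/DS/Array/amazon-1-sum_of_unique_subarray_YXY.py | distinctSums
-- ===== SOURCE A (Python) =====
-- from collections import defaultdict
--
-- def distinctSums(arr):
--     n = len(arr)
--     last = defaultdict(lambda: -1)
--     res = 0
--     for i in range(n):
--         res += (i - last[arr[i]]) * (n - i)
--         last[arr[i]] = i
--     return res
-- ===== SOURCE B (Python) =====
-- def distinctSums(arr):
--     total = 0
--     for l in range(len(arr)):
--         seen = set()
--         count = 0
--         for x in arr[l:]:
--             seen.add(x)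
--             count += len(seen)
--         total += count
--     return total
-- ===== Notes on version B (the rewrite author's own statement) =====
-- stated objective: alternative
-- what changed: B computes the sum directly from its definition -- for every start index it scans the rest of the array with a growing set, accumulating the set's size -- instead of A's single pass with a last-occurrence dictionary and the (i - last)*(n - i) contribution formula.
import Mathlib
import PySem

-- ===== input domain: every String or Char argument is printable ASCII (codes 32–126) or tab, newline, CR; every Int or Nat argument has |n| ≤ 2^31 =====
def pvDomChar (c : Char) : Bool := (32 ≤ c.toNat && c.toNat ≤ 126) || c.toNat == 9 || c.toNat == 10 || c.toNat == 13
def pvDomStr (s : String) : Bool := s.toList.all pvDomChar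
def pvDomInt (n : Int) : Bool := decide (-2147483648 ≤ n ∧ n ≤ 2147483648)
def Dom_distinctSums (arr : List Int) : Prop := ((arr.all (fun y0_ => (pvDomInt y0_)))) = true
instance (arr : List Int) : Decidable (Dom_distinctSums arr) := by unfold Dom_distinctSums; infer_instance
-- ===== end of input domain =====

-- B replaces A's last-occurrence-dictionary contribution formula by the direct
-- brute-force definition (sum of the distinct count of every subarray, via a
-- growing set per start index); B is the plain definition but O(n^2), not faster.

-- ===== PORT A =====
-- the loop body of A: res += (i - last[arr[i]]) * (n - i); last[arr[i]] = i
def pvStepA (arr : List Int) (n : Int) (st : PySem.Dict Int Int × Int) (i : Int) :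
    PySem.Dict Int Int × Int :=
  (st.1.insert (PySem.List.pyGetD arr i 0) i,
   st.2 + (i - st.1.getD (PySem.List.pyGetD arr i 0) (-1)) * (n - i))

def distinctSums (arr : List Int) : Int :=
  let n : Int := (arr.length : Int)
  ((PySem.List.pyRange 0 n 1).foldl (pvStepA arr n) (PySem.Dict.empty, 0)).2

-- ===== PORT B =====
-- the inner loop body of B: seen.add(x); count += len(seen)
def pvStepB (st : PySem.Set Int × Int) (x : Int) : PySem.Set Int × Int :=
  (PySem.Set.add st.1 x, st.2 + PySem.Set.len (PySem.Set.add st.1 x))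

def distinctSums_alt (arr : List Int) : Int :=
  (PySem.List.pyRange 0 (arr.length : Int) 1).foldl
    (fun total l =>
      total + ((PySem.List.slice arr (some l) none).foldl pvStepB (PySem.Set.empty, 0)).2)
    0

-- ===== PRECONDITION & SPEC =====
def Spec_distinctSums (arr : List Int) (out : Int) : Prop := out = distinctSums_alt arr
instance (arr : List Int) (out : Int) : Decidable (Spec_distinctSums arr out) := by unfold Spec_distinctSums; infer_instance

-- ===== CLAIM (what is proved, stated in full; the proofs are below) =====
def Claim_equal_distinctSums : Prop := ∀ (arr : List Int), Dom_distinctSums arr → Spec_distinctSums arr (distinctSums arr)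

-- ===== LEMMAS AND PROOFS =====

-- index of the last occurrence of v in u (-1 if absent), as A's dict maintains it
def lastIdx : List Int → Int → Int
  | [], _ => -1
  | y :: u, v =>
    if 0 ≤ lastIdx u v then lastIdx u v + 1 else if y = v then 0 else -1

-- A's contribution of index i: i - (last occurrence of arr[i] before i)
def gA (arr : List Int) (i : Nat) : Int := (i : Int) - lastIdx (arr.take i) (arr.getD i 0)

-- 1 if position i is the first occurrence of its value in u, else 0
def newAt (u : List Int) (i : Nat) : Int := if u.getD i 0 ∈ u.take i then 0 else 1

-- common closed form: Σ_i gA(i)·(n-i)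
def pvS (arr : List Int) : Int :=
  ((List.range arr.length).map (fun i => gA arr i * ((arr.length : Int) - (i : Int)))).sum

-- number of distinct elements of u, as Σ_i newAt(i)
def pvC (u : List Int) : Int := ((List.range u.length).map (fun i => newAt u i)).sum

-- sum over all prefixes of u of their distinct counts: Σ_i newAt(i)·(|u|-i)
def pvT (u : List Int) : Int :=
  ((List.range u.length).map (fun i => newAt u i * ((u.length : Int) - (i : Int)))).sum

lemma lastIdx_bounds (u : List Int) (v : Int) : -1 ≤ lastIdx u v ∧ lastIdx u v < (u.length : Int) := by
  induction u with
  | nil => simp [lastIdx]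
  | cons y u ih =>
    simp only [lastIdx, List.length_cons]
    obtain ⟨h1, h2⟩ := ih
    split_ifs <;> push_cast <;> first | omega | (simp only [true_and]; omega)

lemma lastIdx_nonneg_iff (u : List Int) (v : Int) : 0 ≤ lastIdx u v ↔ v ∈ u := by
  induction u with
  | nil => simp [lastIdx]
  | cons y u ih =>
    simp only [lastIdx, List.mem_cons]
    have := lastIdx_bounds u v
    split_ifs with h1 h2 <;> simp_all <;> omega

lemma lastIdx_append_singleton (u : List Int) (y v : Int) :
    lastIdx (u ++ [y]) v = if y = v then (u.length : Int) else lastIdx u v := by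
  induction u with
  | nil => simp [lastIdx]
  | cons z u ih =>
    have := lastIdx_bounds u v
    simp only [List.cons_append, lastIdx, ih, List.length_cons]
    split_ifs <;> push_cast <;> omega

lemma take_succ_of_lt (arr : List Int) (k : Nat) (h : k < arr.length) :
    arr.take (k + 1) = arr.take k ++ [arr.getD k 0] := by
  rw [List.take_add_one, List.getElem?_eq_getElem h]
  simp [List.getD, List.getElem?_eq_getElem h]

-- ===== A-side: fold invariant =====
lemma foldA (arr : List Int) (j : Nat) : ∀ (k : Nat) (d : PySem.Dict Int Int) (res : Int),
    k + j = arr.length →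
    (∀ x, d.getD x (-1) = lastIdx (arr.take k) x) →
    ((PySem.List.pyRange (k : Int) (arr.length : Int) 1).foldl (pvStepA arr (arr.length : Int)) (d, res)).2
      = res + ((List.range' k j).map (fun i => gA arr i * ((arr.length : Int) - (i : Int)))).sum := by
  induction j with
  | zero =>
    intro k d res hk _
    rw [PySem.List.pyRange_one_eq_nil (by omega)]
    simp
  | succ j ih =>
    intro k d res hk hinv
    have hklt : k < arr.length := by omega
    rw [PySem.List.pyRange_one_cons (by exact_mod_cast hklt), List.foldl_cons]
    have hstep : pvStepA arr (arr.length : Int) (d, res) (k : Int)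
        = (d.insert (arr.getD k 0) (k : Int),
           res + gA arr k * ((arr.length : Int) - (k : Int))) := by
      unfold pvStepA
      rw [PySem.List.pyGetD_natCast arr k 0, hinv (arr.getD k 0)]
      simp [gA]
    have hcast : ((k : Int) + 1) = ((k + 1 : Nat) : Int) := by push_cast; ring
    have hinv' : ∀ x, (d.insert (arr.getD k 0) (k : Int)).getD x (-1)
        = lastIdx (arr.take (k + 1)) x := by
      intro x
      rw [PySem.Dict.getD_insert, take_succ_of_lt arr k hklt, lastIdx_append_singleton,
        ← hinv x]
      have hmin : min ((k : Nat) : Int) ((arr.length : Nat) : Int) = ((k : Nat) : Int) := by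
        have : (k : Int) ≤ (arr.length : Int) := by exact_mod_cast hklt.le
        omega
      simp only [List.getD] at *
      by_cases hx : x = arr[k]?.getD 0
      · simp [hx]
        all_goals omega
      · have hx2 : ¬ arr[k]?.getD 0 = x := fun h => hx h.symm
        simp [hx, hx2]
    rw [hstep, hcast, ih (k + 1) _ _ (by omega) hinv', List.range'_succ, List.map_cons,
      List.sum_cons]
    ring

lemma A_eq_S (arr : List Int) : distinctSums arr = pvS arr := by
  unfold distinctSums pvS
  have h := foldA arr arr.length 0 PySem.Dict.empty 0 (by omega)
    (by intro x; simp [lastIdx, PySem.Dict.getD_empty])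
  simpa [List.range_eq_range'] using h

-- ===== B-side: inner fold computes pvT =====
lemma newAt_append (u : List Int) (y : Int) (i : Nat) (h : i < u.length) :
    newAt (u ++ [y]) i = newAt u i := by
  unfold newAt
  rw [List.getD_append u [y] 0 i h, List.take_append_of_le_length (Nat.le_of_lt h)]

lemma newAt_append_last (u : List Int) (y : Int) :
    newAt (u ++ [y]) u.length = if y ∈ u then 0 else 1 := by
  unfold newAt
  simp [List.getD]

lemma pvC_append (u : List Int) (y : Int) :
    pvC (u ++ [y]) = pvC u + (if y ∈ u then 0 else 1) := by
  unfold pvC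
  rw [List.length_append, List.length_singleton, List.range_succ, List.map_append,
    List.sum_append, List.map_singleton, List.sum_singleton, newAt_append_last]
  have h := List.map_congr_left (l := List.range u.length)
    (fun i hi => newAt_append u y i (List.mem_range.mp hi))
  rw [h]

lemma C_spec (u : List Int) : ((PySem.Set.ofList u).length : Int) = pvC u := by
  induction u using List.reverseRecOn with
  | nil => simp [pvC]
  | append_singleton u y ih =>
    rw [PySem.Set.ofList_append_singleton, PySem.Set.add_eq_ite, pvC_append, ← ih]
    by_cases hy : y ∈ u
    · simp [hy, PySem.Set.mem_ofList]
    · simp [hy, PySem.Set.mem_ofList]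

lemma pvT_append (u : List Int) (y : Int) :
    pvT (u ++ [y]) = pvT u + pvC (u ++ [y]) := by
  unfold pvT pvC
  have hlen : (u ++ [y]).length = u.length + 1 := by simp
  rw [hlen, List.range_succ, List.map_append, List.map_append, List.sum_append, List.sum_append,
    List.map_singleton, List.map_singleton, List.sum_singleton, List.sum_singleton]
  have hcongr : List.map (fun i => newAt (u ++ [y]) i * (((u.length + 1 : Nat) : Int) - (i : Int)))
      (List.range u.length)
      = List.map (fun i => newAt u i * ((u.length : Int) - (i : Int)) + newAt (u ++ [y]) i)
      (List.range u.length) := by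
    apply List.map_congr_left
    intro i hi
    rw [newAt_append u y i (List.mem_range.mp hi)]
    push_cast
    ring
  rw [hcongr, PySem.List.sum_map_add_int]
  push_cast
  ring

lemma len_eq_length (s : PySem.Set Int) : PySem.Set.len s = (s.length : Int) := rfl

lemma inner_spec (u : List Int) :
    u.foldl pvStepB (PySem.Set.empty, 0) = (PySem.Set.ofList u, pvT u) := by
  induction u using List.reverseRecOn with
  | nil => rfl
  | append_singleton u y ih =>
    rw [List.foldl_append, ih, List.foldl_cons, List.foldl_nil]
    unfold pvStepB
    rw [← PySem.Set.ofList_append_singleton, len_eq_length, C_spec, ← pvT_append]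

-- ===== cons recursion =====
lemma gA_cons (x : Int) (t : List Int) (i : Nat) (_h : i < t.length) :
    gA (x :: t) (i + 1) = gA t i + newAt (x :: t) (i + 1) := by
  unfold gA newAt
  have htake : (x :: t).take (i + 1) = x :: t.take i := rfl
  have hget : (x :: t).getD (i + 1) 0 = t.getD i 0 := rfl
  rw [htake, hget]
  have hb := lastIdx_bounds (t.take i) (t.getD i 0)
  have hm := lastIdx_nonneg_iff (t.take i) (t.getD i 0)
  simp only [lastIdx, List.mem_cons]
  by_cases h0 : 0 ≤ lastIdx (t.take i) (t.getD i 0)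
  · have hv : t.getD i 0 ∈ t.take i := hm.mp h0
    rw [if_pos h0, if_pos (Or.inr hv)]
    push_cast
    ring
  · rw [if_neg h0]
    have hv : t.getD i 0 ∉ t.take i := fun h => h0 (hm.mpr h)
    have hr : lastIdx (t.take i) (t.getD i 0) = -1 := by omega
    by_cases hx : x = t.getD i 0
    · rw [if_pos hx, if_pos (Or.inl hx.symm), hr]
      push_cast
      ring
    · rw [if_neg hx,
        if_neg (fun hor : t.getD i 0 = x ∨ t.getD i 0 ∈ t.take i =>
          hor.elim (fun h => hx h.symm) hv), hr]
      push_cast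
      ring

lemma S_cons (x : Int) (t : List Int) : pvS (x :: t) = pvT (x :: t) + pvS t := by
  unfold pvS pvT
  have hlen : (x :: t).length = t.length + 1 := rfl
  rw [hlen, List.range_succ_eq_map, List.map_cons, List.sum_cons, List.map_cons, List.sum_cons,
    List.map_map, List.map_map]
  have hgA0 : gA (x :: t) 0 = 1 := by simp [gA, lastIdx]
  have hnew0 : newAt (x :: t) 0 = 1 := by simp [newAt]
  have h1 : List.map ((fun i => gA (x :: t) i * (((t.length + 1 : Nat) : Int) - (i : Int))) ∘ Nat.succ)
      (List.range t.length)
      = List.map (fun i => gA t i * ((t.length : Int) - (i : Int))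
          + newAt (x :: t) (i + 1) * (((t.length + 1 : Nat) : Int) - ((i + 1 : Nat) : Int)))
      (List.range t.length) := by
    apply List.map_congr_left
    intro i hi
    simp only [Function.comp, Nat.succ_eq_add_one]
    rw [gA_cons x t i (List.mem_range.mp hi)]
    push_cast
    ring
  have h2 : List.map ((fun i => newAt (x :: t) i * (((t.length + 1 : Nat) : Int) - (i : Int))) ∘ Nat.succ)
      (List.range t.length)
      = List.map (fun i => newAt (x :: t) (i + 1) * (((t.length + 1 : Nat) : Int) - ((i + 1 : Nat) : Int)))
      (List.range t.length) := by
    apply List.map_congr_left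
    intro i _
    simp only [Function.comp, Nat.succ_eq_add_one]
  rw [h1, h2, PySem.List.sum_map_add_int, hgA0, hnew0]
  push_cast
  ring

lemma S_eq_sum_T (arr : List Int) :
    pvS arr = ((List.range arr.length).map (fun l => pvT (arr.drop l))).sum := by
  induction arr with
  | nil => simp [pvS]
  | cons x t ih =>
    rw [S_cons, ih]
    have hlen : (x :: t).length = t.length + 1 := rfl
    rw [hlen, List.range_succ_eq_map, List.map_cons, List.sum_cons, List.map_map]
    rfl

lemma B_eq_sum_T (arr : List Int) :
    distinctSums_alt arr = ((List.range arr.length).map (fun l => pvT (arr.drop l))).sum := by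
  unfold distinctSums_alt
  rw [PySem.List.pyRange_zero_natCast, List.foldl_map]
  have h1 : ∀ (acc : Int) (l : Nat), l ∈ List.range arr.length →
      acc + ((PySem.List.slice arr (some ((l : Nat) : Int)) none).foldl pvStepB (PySem.Set.empty, 0)).2
        = acc + pvT (arr.drop l) := by
    intro acc l _
    rw [PySem.List.slice_from_natCast, inner_spec]
  rw [PySem.List.foldl_congr_mem (List.range arr.length) _
      (fun (acc : Int) (l : Nat) => acc + pvT (arr.drop l)) 0 h1,
    PySem.List.foldl_add, zero_add]

-- ===== VERDICT (by name: the statement is the Claim_ definition above) =====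
theorem distinctSums_spec : Claim_equal_distinctSums := by
  intro arr _
  show distinctSums arr = distinctSums_alt arr
  rw [A_eq_S, B_eq_sum_T, S_eq_sum_T]
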